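-- pv_equiv track=rewrite | github.com/molnard89/adventofcode22 | day6/detect_beginning_of_stream.py | find_unique_set
-- ===== SOURCE A (Python) =====
-- from collections import deque
--
-- def find_unique_set(beeps, N):
--     cutout = deque([], N)
--     for i, beep in enumerate(beeps):
--         cutout.append(beep)
--         index = i+1
--         if index > N-1:
--             if len(set(cutout)) == N:
--                 return index
--     return None
-- ===== SOURCE B (Python) =====
-- def find_unique_set(beeps, N):
--     counts = {}
--     dups = 0
--     for i, c in enumerate(beeps):
--         counts[c] = counts.get(c, 0) + 1
--         if counts[c] == 2:
--             dups += 1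
--         if i >= N:
--             d = beeps[i - N]
--             if counts[d] == 2:
--                 dups -= 1
--             counts[d] = counts[d] - 1
--         if i + 1 >= N and dups == 0:
--             return i + 1
--     return None
-- ===== Notes on version B (the rewrite author's own statement) =====
-- stated objective: faster
-- what changed: Replaces the per-position rebuild of set(window) (O(N) work at each index) by a single sliding-window pass maintaining a char-count dict and a duplicate counter updated incrementally in O(1) per character.
import Mathlib
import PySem

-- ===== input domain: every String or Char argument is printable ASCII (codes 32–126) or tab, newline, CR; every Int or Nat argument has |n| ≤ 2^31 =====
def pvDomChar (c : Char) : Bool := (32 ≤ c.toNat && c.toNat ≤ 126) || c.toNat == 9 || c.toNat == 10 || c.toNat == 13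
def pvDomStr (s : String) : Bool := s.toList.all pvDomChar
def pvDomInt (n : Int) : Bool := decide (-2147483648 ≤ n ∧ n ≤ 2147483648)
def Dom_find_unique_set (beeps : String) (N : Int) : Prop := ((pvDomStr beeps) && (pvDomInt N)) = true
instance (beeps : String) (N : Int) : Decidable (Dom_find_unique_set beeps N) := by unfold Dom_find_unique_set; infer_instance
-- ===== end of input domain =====

-- B replaces A's per-position set(window) rebuild by one sliding-window pass with a
-- char-count dict and an incrementally maintained duplicate counter (objective: faster).

-- ===== PORT A =====
-- the loop of A: rest = remaining chars, i = current enumerate index, cutout = the maxlen-N deque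
def find_unique_set_go (N : Int) (rest : List Char) (i : Int) (cutout : List Char) : Option Int :=
  match rest with
  | [] => none
  | beep :: rest =>
    -- cutout.append(beep) on a deque with maxlen N keeps the last N elements
    let cutout := (cutout ++ [beep]).drop (cutout.length + 1 - N.toNat)
    let index := i + 1
    if index > N - 1 then
      if ((PySem.Set.ofList cutout).length : Int) = N then some index
      else find_unique_set_go N rest index cutout
    else find_unique_set_go N rest index cutout

def find_unique_set (beeps : String) (N : Int) : Option Int :=
  find_unique_set_go N beeps.toList 0 []

-- ===== PORT B =====
-- the loop of B: counts = char-count dict of the current window, dups = #chars with count ≥ 2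
def find_unique_set_alt_go (bl : List Char) (N : Int) (rest : List Char) (i : Int)
    (counts : PySem.Dict Char Int) (dups : Int) : Option Int :=
  match rest with
  | [] => none
  | c :: rest =>
    let counts := counts.insert c (counts.getD c 0 + 1)
    let dups := if counts.getD c 0 = 2 then dups + 1 else dups
    let s : PySem.Dict Char Int × Int :=
      if i ≥ N then
        -- beeps[i - N]: in range whenever 0 ≤ N ≤ i < len(beeps), the only reachable case under Pre_
        let d := (PySem.List.pyGet? bl (i - N)).getD ' '
        let dups := if counts.getD d 0 = 2 then dups - 1 else dups
        (counts.insert d (counts.getD d 0 - 1), dups)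
      else (counts, dups)
    if i + 1 ≥ N ∧ s.2 = 0 then some (i + 1)
    else find_unique_set_alt_go bl N rest (i + 1) s.1 s.2

def find_unique_set_alt (beeps : String) (N : Int) : Option Int :=
  find_unique_set_alt_go beeps.toList N beeps.toList 0 PySem.Dict.empty 0

-- ===== PRECONDITION & SPEC =====
-- Pre_ excludes N < 0, on which A raises ValueError (deque with a negative maxlen).
def Pre_find_unique_set (beeps : String) (N : Int) : Prop := 0 ≤ N
instance (beeps : String) (N : Int) : Decidable (Pre_find_unique_set beeps N) := by
  unfold Pre_find_unique_set; infer_instance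

def pvWitness_find_unique_set : String × Int := ("abcab", 3)

def Spec_find_unique_set (beeps : String) (N : Int) (out : Option Int) : Prop := out = find_unique_set_alt beeps N
instance (beeps : String) (N : Int) (out : Option Int) : Decidable (Spec_find_unique_set beeps N out) := by unfold Spec_find_unique_set; infer_instance

-- ===== CLAIM (what is proved, stated in full; the proofs are below) =====
def Claim_equal_find_unique_set : Prop := ∀ (beeps : String) (N : Int), Dom_find_unique_set beeps N → Pre_find_unique_set beeps N → Spec_find_unique_set beeps N (find_unique_set beeps N)

-- ===== LEMMAS AND PROOFS =====

-- number of distinct chars occurring at least twice in l (what B's dups tracks)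
def dupcount (l : List Char) : Nat :=
  (l.toFinset.filter (fun c => 2 ≤ l.count c)).card

lemma dup_perm {l l' : List Char} (h : l.Perm l') : dupcount l = dupcount l' := by
  unfold dupcount
  have h1 : l.toFinset = l'.toFinset := by
    ext x; simp [List.mem_toFinset, h.mem_iff]
  rw [h1, Finset.filter_congr (fun x _ => by rw [h.count_eq])]

lemma dup_append (l : List Char) (c : Char) :
    dupcount (l ++ [c]) = dupcount l + (if l.count c = 1 then 1 else 0) := by
  unfold dupcount
  have hcnt : ∀ x, (l ++ [c]).count x = l.count x + (if x = c then 1 else 0) := by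
    intro x
    by_cases hx : x = c
    · simp [hx]
    · simp [List.count_append, List.count_eq_zero.mpr (by simp [hx] : x ∉ [c]), hx]
  have hfin : (l ++ [c]).toFinset = insert c l.toFinset := by
    ext x; simp
  rw [hfin]
  by_cases h0 : c ∈ l
  · have hmem : c ∈ l.toFinset := List.mem_toFinset.mpr h0
    have hins : insert c l.toFinset = l.toFinset := Finset.insert_eq_self.mpr hmem
    rw [hins]
    have hpos : 1 ≤ l.count c := List.one_le_count_iff.mpr h0
    by_cases h1 : l.count c = 1
    · have hset : l.toFinset.filter (fun x => 2 ≤ (l ++ [c]).count x)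
           = insert c (l.toFinset.filter (fun x => 2 ≤ l.count x)) := by
        ext x
        by_cases hx : x = c <;>
          simp [Finset.mem_filter, Finset.mem_insert, hcnt, hx, h1, hmem]
      rw [hset, Finset.card_insert_of_notMem (by simp [Finset.mem_filter, h1])]
      simp [h1]
    · have hset : l.toFinset.filter (fun x => 2 ≤ (l ++ [c]).count x)
           = l.toFinset.filter (fun x => 2 ≤ l.count x) := by
        ext x
        by_cases hx : x = c
        · simp [Finset.mem_filter, hcnt, hx]
          omega
        · simp [Finset.mem_filter, hcnt, hx]
      rw [hset]; simp [h1]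
  · have h00 : l.count c = 0 := List.count_eq_zero.mpr h0
    have hset : (insert c l.toFinset).filter (fun x => 2 ≤ (l ++ [c]).count x)
         = l.toFinset.filter (fun x => 2 ≤ l.count x) := by
      ext x
      by_cases hx : x = c <;>
        simp [Finset.mem_filter, Finset.mem_insert, hcnt, hx, h00, h0]
    rw [hset]; simp [h00]

lemma dup_cons (d : Char) (t : List Char) :
    dupcount (d :: t) = dupcount t + (if t.count d = 1 then 1 else 0) := by
  have hperm : (d :: t).Perm (t ++ [d]) := (List.perm_append_singleton d t).symm
  rw [dup_perm hperm, dup_append]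

lemma dup_eq_zero_iff (l : List Char) : dupcount l = 0 ↔ l.Nodup := by
  unfold dupcount
  rw [Finset.card_eq_zero, Finset.filter_eq_empty_iff, List.nodup_iff_count_le_one]
  constructor
  · intro h x
    by_cases hx : x ∈ l
    · have := h (List.mem_toFinset.mpr hx); omega
    · rw [List.count_eq_zero.mpr hx]; omega
  · intro h x _
    have := h x; omega

lemma ofList_length_eq_iff (l : List Char) :
    (PySem.Set.ofList l).length = l.length ↔ l.Nodup := by
  constructor
  · intro h
    have hfin : (PySem.Set.ofList l).toFinset = l.toFinset := by
      ext x; simp [List.mem_toFinset, PySem.Set.mem_ofList]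
    have h1 : (PySem.Set.ofList l).toFinset.card = (PySem.Set.ofList l).length :=
      List.toFinset_card_of_nodup (PySem.Set.nodup_ofList l)
    have h2 : l.toFinset.card = l.dedup.length := List.card_toFinset l
    have h3 : l.dedup.length = l.length := by
      rw [← h2, ← hfin, h1]; exact h
    have : l.dedup = l := (List.dedup_sublist l).eq_of_length h3
    rw [← this]; exact List.nodup_dedup l
  · intro h; rw [PySem.Set.ofList_eq_self_of_nodup l h]

-- the two return tests agree on a full window
lemma check_iff (l : List Char) (N : Int) (hl : (l.length : Int) = N) :
    (((PySem.Set.ofList l).length : Int) = N ↔ (dupcount l : Int) = 0) := by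
  rw [← hl]
  have h1 : ((PySem.Set.ofList l).length : Int) = (l.length : Int) ↔
      (PySem.Set.ofList l).length = l.length := by exact_mod_cast Iff.rfl
  have h2 : (dupcount l : Int) = 0 ↔ dupcount l = 0 := by exact_mod_cast Iff.rfl
  rw [h1, h2, ofList_length_eq_iff, dup_eq_zero_iff]

lemma pv_if_congr {α : Type} {c1 c2 : Prop} [Decidable c1] [Decidable c2] {a b1 b2 : α}
    (h : c1 ↔ c2) (hb : b1 = b2) : (if c1 then a else b1) = (if c2 then a else b2) := by
  by_cases x : c1
  · rw [if_pos x, if_pos (h.mp x)]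
  · rw [if_neg x, if_neg (fun y => x (h.mpr y)), hb]

lemma go_eq (N : Int) (hN : 0 ≤ N) (bl : List Char) (rest : List Char) :
    ∀ (p : List Char) (counts : PySem.Dict Char Int) (dups : Int),
      bl = p ++ rest →
      (∀ x, counts.getD x 0 = ((p.drop (p.length - N.toNat)).count x : Int)) →
      dups = (dupcount (p.drop (p.length - N.toNat)) : Int) →
      find_unique_set_go N rest (p.length : Int) (p.drop (p.length - N.toNat)) =
      find_unique_set_alt_go bl N rest (p.length : Int) counts dups := by
  induction rest with
  | nil =>
    intro p counts dups _ _ _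
    simp [find_unique_set_go, find_unique_set_alt_go]
  | cons c rest ih =>
    intro p counts dups hbl hc hd
    have hNn : N = (N.toNat : Int) := (Int.toNat_of_nonneg hN).symm
    set k := p.length with hk
    set n := N.toNat with hn
    set w := p.drop (k - n) with hw
    have hbl2 : bl = (p ++ [c]) ++ rest := by rw [hbl, List.append_assoc]; rfl
    have hwlen : w.length = k - (k - n) := by rw [hw, List.length_drop]
    have hw1 : w ++ [c] = (p ++ [c]).drop (k - n) := by
      rw [hw, List.drop_append_of_le_length (by omega)]
    have hcut : (w ++ [c]).drop (w.length + 1 - n) = (p ++ [c]).drop (k + 1 - n) := by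
      rw [hw1, List.drop_drop]; congr 1; omega
    set w' := (p ++ [c]).drop (k + 1 - n) with hw'
    -- B's state after the unconditional insert tracks the multiset w ++ [c]
    have hc1 : ∀ x, ((counts.insert c (counts.getD c 0 + 1)).getD x 0) = (((w ++ [c]).count x : Nat) : Int) := by
      intro x
      rw [PySem.Dict.getD_insert]
      by_cases hx : x = c
      · subst hx; rw [if_pos rfl, hc]; simp [List.count_append]
      · rw [if_neg hx, hc x]
        have : x ∉ [c] := by simp [hx]
        simp [List.count_append, List.count_eq_zero.mpr this]
    -- unfold one step of both loops
    have hd1 : (if (counts.insert c (counts.getD c 0 + 1)).getD c 0 = 2 then dups + 1 else dups)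
        = (dupcount (w ++ [c]) : Int) := by
      rw [hc1 c, hd, dup_append]
      have hcc : (w ++ [c]).count c = w.count c + 1 := by simp [List.count_append]
      by_cases h1 : w.count c = 1
      · rw [if_pos (by omega), if_pos h1]; push_cast; ring
      · rw [if_neg (by omega), if_neg h1]; push_cast; ring
    rw [find_unique_set_go, find_unique_set_alt_go]
    simp only [← hn]
    simp only [hcut, hd1]
    have hlen2 : (p ++ [c]).length = k + 1 := by simp [hk]
    -- shared recursion step: both loops continue on the window w'
    have hrecG : ∀ (counts2 : PySem.Dict Char Int) (dups2 : Int),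
        (∀ x, counts2.getD x 0 = ((w'.count x : Nat) : Int)) →
        dups2 = (dupcount w' : Int) →
        find_unique_set_go N rest ((k : Int) + 1) w' =
        find_unique_set_alt_go bl N rest ((k : Int) + 1) counts2 dups2 := by
      intro counts2 dups2 hcc hdd2
      have := ih (p ++ [c]) counts2 dups2 hbl2
        (by intro x; rw [hlen2, ← hw']; exact hcc x)
        (by rw [hlen2, ← hw']; exact hdd2)
      rw [hlen2, ← hw'] at this
      push_cast at this
      exact this
    have hlenw' : (k : Int) + 1 ≥ N → ((w'.length : Nat) : Int) = N := by
      intro hfull; rw [hw', List.length_drop]; simp; omega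
    by_cases hi : (k : Int) ≥ N
    · -- window is full: B also removes the outgoing character bl[k - N]
      have hnk : n ≤ k := by omega
      have hlen1 : k - n < (p ++ [c]).length := by simp; omega
      have hget : PySem.List.pyGet? bl ((k : Int) - N) = some ((p ++ [c])[k - n]'hlen1) := by
        have h1 : (k : Int) - N = ((k - n : Nat) : Int) := by omega
        rw [hbl2, h1, PySem.List.pyGet?_natCast]
        rw [List.getElem?_append_left hlen1, List.getElem?_eq_getElem hlen1]
      set d : Char := (p ++ [c])[k - n]'hlen1 with hdd
      have hdecomp : w ++ [c] = d :: w' := by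
        rw [hw1, List.drop_eq_getElem_cons hlen1, hw']
        congr 2
        omega
      have hcnt_cons : ∀ x, (w ++ [c]).count x = w'.count x + (if x = d then 1 else 0) := by
        intro x
        rw [hdecomp]
        by_cases hx : x = d
        · subst hx; simp
        · have hx' : d ≠ x := fun h => hx h.symm
          simp [hx, hx']
      -- the removal step restores the invariant for the window w'
      have hc2 : ∀ x, (((counts.insert c (counts.getD c 0 + 1)).insert d
            ((counts.insert c (counts.getD c 0 + 1)).getD d 0 - 1)).getD x 0)
          = ((w'.count x : Nat) : Int) := by
        intro x
        rw [PySem.Dict.getD_insert]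
        by_cases hx : x = d
        · subst hx; rw [if_pos rfl, hc1]; rw [hcnt_cons d]; simp
        · rw [if_neg hx, hc1 x, hcnt_cons x, if_neg hx]; simp
      have hd2 : (if (counts.insert c (counts.getD c 0 + 1)).getD d 0 = 2
            then (dupcount (w ++ [c]) : Int) - 1 else (dupcount (w ++ [c]) : Int))
          = (dupcount w' : Int) := by
        rw [hc1 d]
        have hdc : dupcount (w ++ [c]) = dupcount w' + (if w'.count d = 1 then 1 else 0) := by
          rw [hdecomp, dup_cons]
        have hcd : (w ++ [c]).count d = w'.count d + 1 := by
          rw [hcnt_cons d, if_pos rfl]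
        by_cases h1 : w'.count d = 1
        · rw [if_pos (by omega), hdc, if_pos h1]; push_cast; ring
        · rw [if_neg (by omega), hdc, if_neg h1]; push_cast; ring
      have hiff := check_iff w' N (hlenw' (by omega))
      have hA : ((k : Int) + 1 > N - 1) := by omega
      rw [if_pos hi, hget]
      simp only [Option.getD_some]
      rw [if_pos hA]
      refine pv_if_congr ?_ ?_
      · constructor
        · intro hA2
          exact ⟨by omega, hd2.trans (hiff.mp hA2)⟩
        · rintro ⟨-, h2⟩
          exact hiff.mpr (hd2.symm.trans h2)
      · exact hrecG _ _ hc2 hd2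
    · -- window not yet full: no removal; the new window is w ++ [c]
      have hnk : k < n := by omega
      have hweq : w' = w ++ [c] := by
        rw [hw', hw1]
        congr 1
        omega
      rw [if_neg hi]
      have hrec1 := hrecG (counts.insert c (counts.getD c 0 + 1)) ((dupcount (w ++ [c]) : Nat) : Int)
        (by intro x; rw [hweq]; exact hc1 x) (by rw [hweq])
      by_cases hfull : (k : Int) + 1 ≥ N
      · have hA : ((k : Int) + 1 > N - 1) := by omega
        have hiff := check_iff w' N (hlenw' hfull)
        rw [if_pos hA]
        refine pv_if_congr ?_ ?_
        · constructor
          · intro hA2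
            have hz := hiff.mp hA2
            rw [hweq] at hz
            exact ⟨hfull, hz⟩
          · rintro ⟨-, h2⟩
            exact hiff.mpr (by rw [hweq]; exact h2)
        · exact hrec1
      · have hA : ¬ ((k : Int) + 1 > N - 1) := by omega
        have hnc : ¬ (((k : Int) + 1 ≥ N) ∧ (dupcount (w ++ [c]) : Int) = 0) := by
          rintro ⟨h, -⟩; exact hfull h
        rw [if_neg hA, if_neg hnc]
        exact hrec1

-- ===== VERDICT (by name: the statement is the Claim_ definition above) =====
theorem find_unique_set_spec : Claim_equal_find_unique_set := by
  intro beeps N _ hPre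
  unfold Spec_find_unique_set find_unique_set find_unique_set_alt
  have h := go_eq N hPre beeps.toList beeps.toList [] PySem.Dict.empty 0
    (by simp) (by intro x; simp [PySem.Dict.getD_empty]) (by simp [dupcount])
  simpa using h
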